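-- pv_equiv track=rewrite | github.com/nickgoberville/nickgoberville | generate_research_areas.py | count_research_areas
-- ===== SOURCE A (Python) =====
-- from collections import Counter
--
-- def count_research_areas(publications, keywords_dict):
--     """Count mentions of research area keywords in publication titles."""
--     area_counts = Counter()
--
--     for title in publications:
--         title_lower = title.lower()
--         for area, keywords in keywords_dict.items():
--             for keyword in keywords:
--                 if keyword in title_lower:
--                     area_counts[area] += 1
--                     break  # Only count once per area per paper
--
--     return area_counts
-- ===== SOURCE B (Python) =====
-- from collections import Counter
--
-- def count_research_areas(publications, keywords_dict):
--     """Count mentions of research area keywords in publication titles."""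
--     items = list(keywords_dict.items())
--     all_kws = {kw for _, kws in items for kw in kws}
--     matched = []
--     for title in publications:
--         lt = title.lower()
--         found = {kw for kw in all_kws if kw in lt}
--         matched.extend(a for a, kws in items if any(k in found for k in kws))
--     return Counter(matched)
-- ===== Notes on version B (the rewrite author's own statement) =====
-- stated objective: alternative
-- what changed: B hoists the substring tests to a single pass per title over the deduplicated keyword set, replaces the per-area keyword scan with hash-set membership (no break needed), and builds the Counter once from the flattened list of matched areas instead of incrementing it inside the nested loops.
import Mathlib
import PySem

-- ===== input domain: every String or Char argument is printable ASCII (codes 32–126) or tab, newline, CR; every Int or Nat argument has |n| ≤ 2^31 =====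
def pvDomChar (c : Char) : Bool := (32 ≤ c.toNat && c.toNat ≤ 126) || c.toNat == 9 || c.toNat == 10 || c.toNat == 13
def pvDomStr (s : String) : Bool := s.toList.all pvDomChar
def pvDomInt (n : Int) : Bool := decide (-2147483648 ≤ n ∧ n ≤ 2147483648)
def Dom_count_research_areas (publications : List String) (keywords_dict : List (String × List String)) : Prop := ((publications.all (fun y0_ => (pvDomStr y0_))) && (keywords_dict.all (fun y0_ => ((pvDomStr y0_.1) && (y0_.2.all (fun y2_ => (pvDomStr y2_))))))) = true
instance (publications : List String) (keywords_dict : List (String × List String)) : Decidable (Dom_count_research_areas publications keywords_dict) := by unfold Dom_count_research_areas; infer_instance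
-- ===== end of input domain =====

-- B hoists substring tests to one pass per title over the deduplicated keyword set and
-- builds the Counter once from the flattened match list (alternative decomposition, same results).


-- ===== PORT A =====
-- inner loop 'for keyword in keywords: if keyword in title_lower: area_counts[area] += 1; break'
def craKwLoop (counts : PySem.Dict String Int) (area : String) (kws : List String) (tl : String) : PySem.Dict String Int :=
  match kws with
  | [] => counts
  | k :: rest =>
    if PySem.Str.isIn k tl then counts.modify area 0 (· + 1)
    else craKwLoop counts area rest tl

def count_research_areas (publications : List String) (keywords_dict : List (String × List String)) : List (String × Int) :=
  (publications.foldl (fun counts title =>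
      let tl := PySem.Str.lower title
      ((PySem.Dict.ofList keywords_dict).items).foldl
        (fun counts p => craKwLoop counts p.1 p.2 tl) counts)
    PySem.Dict.empty).items

-- ===== PORT B =====
def count_research_areas_alt (publications : List String) (keywords_dict : List (String × List String)) : List (String × Int) :=
  let items := (PySem.Dict.ofList keywords_dict).items
  let all_kws := PySem.Set.ofList (items.flatMap (fun p => p.2))
  let matched := publications.foldl (fun acc title =>
      let lt := PySem.Str.lower title
      let found := all_kws.filter (fun kw => PySem.Str.isIn kw lt)
      acc ++ (items.filter (fun p => p.2.any (fun k => PySem.Set.contains found k))).map (fun p => p.1)) []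
  (PySem.Dict.counter matched).items

-- ===== PRECONDITION & SPEC =====
def Spec_count_research_areas (publications : List String) (keywords_dict : List (String × List String)) (out : List (String × Int)) : Prop := out = count_research_areas_alt publications keywords_dict
instance (publications : List String) (keywords_dict : List (String × List String)) (out : List (String × Int)) : Decidable (Spec_count_research_areas publications keywords_dict out) := by unfold Spec_count_research_areas; infer_instance

-- ===== CLAIM (what is proved, stated in full; the proofs are below) =====
def Claim_equal_count_research_areas : Prop := ∀ (publications : List String) (keywords_dict : List (String × List String)), Dom_count_research_areas publications keywords_dict → Spec_count_research_areas publications keywords_dict (count_research_areas publications keywords_dict)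

-- ===== LEMMAS AND PROOFS =====

theorem cra_foldl_congr {α β : Type} (l : List α) (f g : β → α → β) (c : β)
    (h : ∀ b a, a ∈ l → f b a = g b a) : l.foldl f c = l.foldl g c := by
  induction l generalizing c with
  | nil => rfl
  | cons x xs ih => simp only [List.foldl_cons, h c x (by simp)]; exact ih _ fun b a ha => h b a (by simp [ha])

-- the break-loop is 'if any keyword matches then increment once'
theorem cra_any_congr (l : List String) (f g : String → Bool)
    (h : ∀ x ∈ l, f x = g x) : l.any f = l.any g := by
  induction l with
  | nil => rfl
  | cons x xs ih =>
    simp only [List.any_cons, h x (by simp), ih fun y hy => h y (by simp [hy])]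

-- the break-loop is 'if any keyword matches then increment once'
theorem craKwLoop_eq (counts : PySem.Dict String Int) (area : String) (kws : List String) (tl : String) :
    craKwLoop counts area kws tl =
      if kws.any (fun k => PySem.Str.isIn k tl) then counts.modify area 0 (· + 1) else counts := by
  induction kws with
  | nil => simp [craKwLoop]
  | cons k rest ih =>
    cases hc : PySem.Str.isIn k tl with
    | true => simp only [craKwLoop, hc, List.any_cons, Bool.true_or, if_true]
    | false => simp only [craKwLoop, hc, List.any_cons, Bool.false_or, Bool.false_eq_true, if_false, ih]

-- a fold of guarded increments is the fold of increments over the filtered-and-projected list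
theorem foldl_guard_inc (items : List (String × List String)) (q : String × List String → Bool)
    (c : PySem.Dict String Int) :
    items.foldl (fun c p => if q p then c.modify p.1 0 (· + 1) else c) c =
      ((items.filter q).map (fun p => p.1)).foldl (fun c a => c.modify a 0 (· + 1)) c := by
  induction items generalizing c with
  | nil => rfl
  | cons p rest ih =>
    by_cases h : q p
    · simp [h, ih]
    · simp [h, ih]

-- folding increments over a flatMap-shaped accumulation equals the nested fold
theorem foldl_inc_extend (ts : List String) (f : String → List String) (init : List String)
    (d : PySem.Dict String Int) :
    (ts.foldl (fun acc t => acc ++ f t) init).foldl (fun d x => d.modify x 0 (· + 1)) d =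
      ts.foldl (fun c t => (f t).foldl (fun d x => d.modify x 0 (· + 1)) c)
        (init.foldl (fun d x => d.modify x 0 (· + 1)) d) := by
  induction ts generalizing init d with
  | nil => rfl
  | cons t rest ih =>
    simp only [List.foldl_cons]
    rw [ih, List.foldl_append]

-- membership in the per-title filtered keyword set equals the substring test, for keywords of the dict
theorem found_contains (items : List (String × List String)) (lt : String)
    (p : String × List String) (hp : p ∈ items) :
    (p.2.any (fun k =>
        PySem.Set.contains ((PySem.Set.ofList (items.flatMap (fun p => p.2))).filter
          (fun kw => PySem.Str.isIn kw lt)) k)) =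
      p.2.any (fun k => PySem.Str.isIn k lt) := by
  apply cra_any_congr
  intro k hk
  have hmem : k ∈ PySem.Set.ofList (items.flatMap (fun p => p.2)) := by
    rw [PySem.Set.mem_ofList]
    exact List.mem_flatMap.mpr ⟨p, hp, hk⟩
  have hiff : PySem.Set.contains ((PySem.Set.ofList (items.flatMap (fun p => p.2))).filter
      (fun kw => PySem.Str.isIn kw lt)) k = true ↔ (PySem.Str.isIn k lt = true) := by
    rw [PySem.Set.contains_iff, List.mem_filter]
    simp [hmem]
  cases hca : PySem.Set.contains ((PySem.Set.ofList (items.flatMap (fun p => p.2))).filter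
      (fun kw => PySem.Str.isIn kw lt)) k <;>
    cases hcb : PySem.Str.isIn k lt <;> simp_all

-- one title: A's inner loop over the dict equals incrementing over B's matched-area list
theorem per_title (items : List (String × List String)) (lt : String) (c : PySem.Dict String Int) :
    items.foldl (fun c p => craKwLoop c p.1 p.2 lt) c =
      ((items.filter (fun p => p.2.any (fun k =>
          PySem.Set.contains ((PySem.Set.ofList (items.flatMap (fun p => p.2))).filter
            (fun kw => PySem.Str.isIn kw lt)) k))).map (fun p => p.1)).foldl
        (fun d x => d.modify x 0 (· + 1)) c := by
  rw [List.filter_congr (fun p hp => found_contains items lt p hp)]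
  rw [← foldl_guard_inc]
  exact cra_foldl_congr _ _ _ _ (fun b p _ => craKwLoop_eq b p.1 p.2 lt)

-- ===== VERDICT (by name: the statement is the Claim_ definition above) =====
theorem count_research_areas_spec : Claim_equal_count_research_areas := by
  intro publications keywords_dict _
  unfold Spec_count_research_areas count_research_areas count_research_areas_alt
  simp only [PySem.Dict.counter_eq_foldl]
  rw [
    foldl_inc_extend publications
      (fun t => ((((PySem.Dict.ofList keywords_dict).items).filter (fun p => p.2.any (fun k =>
        PySem.Set.contains ((PySem.Set.ofList (((PySem.Dict.ofList keywords_dict).items).flatMap (fun p => p.2))).filter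
          (fun kw => PySem.Str.isIn kw (PySem.Str.lower t))) k))).map (fun p => p.1))) [] PySem.Dict.empty]
  simp only [List.foldl_nil]
  congr 1
  exact cra_foldl_congr _ _ _ _ (fun c t _ => per_title _ (PySem.Str.lower t) c)
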